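-- pv_equiv track=rewrite | github.com/Jalco28/Advent-of-Code | 2024/Day2.py | analyse_report
-- ===== SOURCE A (Python) =====
-- import itertools
--
-- def analyse_report(report):
--     deltas = [a-b for a, b in itertools.pairwise(report)]
--     delta_sign = [x >= 0 for x in deltas]
--     if len(set(delta_sign)) > 1:
--         return False
--     for d in deltas:
--         if 1 <= abs(d) <= 3:
--             pass
--         else:
--             return False
--     return True
-- ===== SOURCE B (Python) =====
-- import itertools
--
-- def analyse_report(report):
--     pairs = list(itertools.pairwise(report))
--     return (all(1 <= b - a <= 3 for a, b in pairs)
--             or all(-3 <= b - a <= -1 for a, b in pairs))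
-- ===== Notes on version B (the rewrite author's own statement) =====
-- stated objective: simpler
-- what changed: Replaced A's sign-list plus set-cardinality test plus separate magnitude loop by two direct directional predicates: valid iff every consecutive difference is between 1 and 3, or every one is between -3 and -1.
import Mathlib
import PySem

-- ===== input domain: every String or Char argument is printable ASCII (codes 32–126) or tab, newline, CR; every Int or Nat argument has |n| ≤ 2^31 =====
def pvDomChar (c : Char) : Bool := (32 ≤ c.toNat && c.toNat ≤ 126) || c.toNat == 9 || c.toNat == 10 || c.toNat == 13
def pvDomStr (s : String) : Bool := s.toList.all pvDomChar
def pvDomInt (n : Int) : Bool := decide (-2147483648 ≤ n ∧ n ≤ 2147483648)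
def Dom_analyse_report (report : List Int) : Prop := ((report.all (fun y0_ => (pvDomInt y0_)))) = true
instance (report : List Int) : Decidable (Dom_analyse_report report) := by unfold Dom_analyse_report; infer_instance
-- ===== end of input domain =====

-- B replaces A's sign-list + set-cardinality test + magnitude loop by two directional range checks (objective: simpler).

-- ===== PORT A =====
-- the 'for d in deltas: if 1 <= abs(d) <= 3: pass else: return False' loop
def pvLoopA : List Int → Bool
  | [] => true
  | d :: rest => if 1 ≤ |d| ∧ |d| ≤ 3 then pvLoopA rest else false

def analyse_report (report : List Int) : Bool :=
  let deltas := (report.zip report.tail).map (fun p => p.1 - p.2)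
  let delta_sign := deltas.map (fun x => decide (x ≥ 0))
  if (PySem.Set.ofList delta_sign).length > 1 then false
  else pvLoopA deltas

-- ===== PORT B =====
def analyse_report_alt (report : List Int) : Bool :=
  let pairs := report.zip report.tail
  (pairs.all (fun p => decide (1 ≤ p.2 - p.1 ∧ p.2 - p.1 ≤ 3)))
  || (pairs.all (fun p => decide (-3 ≤ p.2 - p.1 ∧ p.2 - p.1 ≤ -1)))

-- ===== PRECONDITION & SPEC =====
def Spec_analyse_report (report : List Int) (out : Bool) : Prop := out = analyse_report_alt report
instance (report : List Int) (out : Bool) : Decidable (Spec_analyse_report report out) := by unfold Spec_analyse_report; infer_instance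

-- ===== CLAIM (what is proved, stated in full; the proofs are below) =====
def Claim_equal_analyse_report : Prop := ∀ (report : List Int), Dom_analyse_report report → Spec_analyse_report report (analyse_report report)

-- ===== LEMMAS AND PROOFS =====

theorem pvLoopA_eq_true (ds : List Int) :
    pvLoopA ds = true ↔ ∀ d ∈ ds, 1 ≤ |d| ∧ |d| ≤ 3 := by
  induction ds with
  | nil => simp [pvLoopA]
  | cons d rest ih =>
    simp only [pvLoopA, List.mem_cons]
    split_ifs with h
    · simp [ih, h]
    · simp only [false_iff]
      intro h'
      exact h (h' d (Or.inl rfl))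

theorem pv_nodup_all_eq {S : List Bool} (hnd : S.Nodup)
    (h : ∀ x ∈ S, ∀ y ∈ S, x = y) : S.length ≤ 1 := by
  match S with
  | [] => simp
  | [a] => simp
  | a :: b :: t =>
    exfalso
    have hab : a ≠ b := by intro e; subst e; simp at hnd
    exact hab (h a (by simp) b (by simp))

-- the core equivalence over the list of deltas d = a - b
theorem pv_key (ds : List Int) :
    (if (PySem.Set.ofList (ds.map (fun x => decide (x ≥ 0)))).length > 1 then false
     else pvLoopA ds)
    = ((ds.all (fun d => decide (-3 ≤ d ∧ d ≤ -1))) || (ds.all (fun d => decide (1 ≤ d ∧ d ≤ 3)))) := by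
  rw [Bool.eq_iff_iff]
  constructor
  · intro h
    split_ifs at h with hlen
    case _ =>
      -- uniform sign, all magnitudes in [1,3]
      have hall := (pvLoopA_eq_true ds).1 h
      have huniq : ∀ x ∈ ds.map (fun x => decide (x ≥ 0)), ∀ y ∈ ds.map (fun x => decide (x ≥ 0)), x = y := by
        intro x hx y hy
        rw [← PySem.Set.mem_ofList] at hx hy
        have hle : (PySem.Set.ofList (ds.map (fun x => decide (x ≥ 0)))).length ≤ 1 := by omega
        match hS : PySem.Set.ofList (ds.map (fun x => decide (x ≥ 0))), hle with
        | [], _ => rw [hS] at hx; simp at hx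
        | [c], _ => rw [hS] at hx hy; simp at hx hy; rw [hx, hy]
      rcases ds with _ | ⟨d0, rest⟩
      · simp
      · by_cases hsgn : d0 ≥ 0
        · -- all ≥ 0, so all in [1,3]
          simp only [Bool.or_eq_true, List.all_eq_true, decide_eq_true_eq]
          right
          intro d hd
          have : decide (d ≥ 0) = decide (d0 ≥ 0) :=
            huniq _ (List.mem_map_of_mem hd) _ (List.mem_map_of_mem (by simp))
          have hd0 : d ≥ 0 := by simp [hsgn] at this; exact this
          have := hall d hd
          rw [abs_of_nonneg hd0] at this
          exact this
        · simp only [Bool.or_eq_true, List.all_eq_true, decide_eq_true_eq]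
          left
          intro d hd
          have : decide (d ≥ 0) = decide (d0 ≥ 0) :=
            huniq _ (List.mem_map_of_mem hd) _ (List.mem_map_of_mem (by simp))
          have hd0 : ¬ d ≥ 0 := by simp [hsgn] at this ⊢; omega
          have := hall d hd
          rw [abs_of_neg (by omega)] at this
          omega
  · intro h
    have hB : (∀ d ∈ ds, -3 ≤ d ∧ d ≤ -1) ∨ (∀ d ∈ ds, 1 ≤ d ∧ d ≤ 3) := by
      rcases Bool.or_eq_true_iff.1 h with h1 | h1
      · left; simpa using h1
      · right; simpa using h1
    have huniq : ∀ x ∈ ds.map (fun x => decide (x ≥ 0)), ∀ y ∈ ds.map (fun x => decide (x ≥ 0)), x = y := by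
      intro x hx y hy
      simp only [List.mem_map] at hx hy
      obtain ⟨dx, hdx, rfl⟩ := hx
      obtain ⟨dy, hdy, rfl⟩ := hy
      rcases hB with hB | hB
      · have := hB dx hdx; have := hB dy hdy
        simp; omega
      · have := hB dx hdx; have := hB dy hdy
        simp; omega
    have hle : (PySem.Set.ofList (ds.map (fun x => decide (x ≥ 0)))).length ≤ 1 := by
      apply pv_nodup_all_eq (PySem.Set.nodup_ofList _)
      intro x hx y hy
      rw [PySem.Set.mem_ofList] at hx hy
      exact huniq x hx y hy
    rw [if_neg (by omega)]
    rw [pvLoopA_eq_true]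
    intro d hd
    rcases hB with hB | hB
    · have := hB d hd; rw [abs_of_neg (by omega)]; omega
    · have := hB d hd; rw [abs_of_nonneg (by omega)]; omega

theorem pv_all_neg (report : List Int) :
    (report.zip report.tail).all (fun p => decide (1 ≤ p.2 - p.1 ∧ p.2 - p.1 ≤ 3))
    = ((report.zip report.tail).map (fun p => p.1 - p.2)).all (fun d => decide (-3 ≤ d ∧ d ≤ -1)) := by
  rw [List.all_map]
  congr 1
  funext p
  simp only [Function.comp]
  rw [Bool.eq_iff_iff]; simp; omega

theorem pv_all_pos (report : List Int) :
    (report.zip report.tail).all (fun p => decide (-3 ≤ p.2 - p.1 ∧ p.2 - p.1 ≤ -1))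
    = ((report.zip report.tail).map (fun p => p.1 - p.2)).all (fun d => decide (1 ≤ d ∧ d ≤ 3)) := by
  rw [List.all_map]
  congr 1
  funext p
  simp only [Function.comp]
  rw [Bool.eq_iff_iff]; simp; omega

-- ===== VERDICT (by name: the statement is the Claim_ definition above) =====
theorem analyse_report_spec : Claim_equal_analyse_report := by
  intro report _
  show analyse_report report = analyse_report_alt report
  simp only [analyse_report, analyse_report_alt]
  rw [pv_all_neg, pv_all_pos]
  exact pv_key _
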